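-- pv_equiv track=rewrite | github.com/Yavanash/foldingdiff_v2 | ss_scaffold/ss_labels.py | find_ss_runs
-- ===== SOURCE A (Python) =====
-- from typing import List, Optional, Tuple
--
-- def find_ss_runs(ss_string: str, target: str, min_len: int = 6) -> List[Tuple[int, int]]:
--     """
--     Find contiguous runs of `target` SS class with length >= min_len.
--     Returns list of (start, end) half-open intervals.
--
--     Example: find_ss_runs("CCCHHHHHHHCCCEEEECC", "H", 5) -> [(3, 10)]
--     """
--     runs = []
--     i, n = 0, len(ss_string)
--     while i < n:
--         if ss_string[i] == target:
--             j = i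
--             while j < n and ss_string[j] == target:
--                 j += 1
--             if j - i >= min_len:
--                 runs.append((i, j))
--             i = j
--         else:
--             i += 1
--     return runs
-- ===== SOURCE B (Python) =====
-- from typing import List, Tuple
--
-- def find_ss_runs(ss_string: str, target: str, min_len: int = 6) -> List[Tuple[int, int]]:
--     """Boundary-detection: build a boolean mask, find run starts and run ends by
--     comparing each position with its neighbour, zip them into intervals, filter by length."""
--     mask = [c == target for c in ss_string]
--     starts = [i for i, (prev, cur) in enumerate(zip([False] + mask, mask)) if cur and not prev]
--     ends = [i for i, (cur, nxt) in enumerate(zip(mask, mask[1:] + [False]), 1) if cur and not nxt]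
--     return [(s, e) for s, e in zip(starts, ends) if e - s >= min_len]
-- ===== Notes on version B (the rewrite author's own statement) =====
-- stated objective: alternative
-- what changed: A's stateful outer/inner while-loop scan is replaced by a staged boundary-detection pipeline: a boolean mask, two neighbour-comparison passes extracting run starts and run ends, a zip pairing them into intervals, and a final length filter.
import Mathlib
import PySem

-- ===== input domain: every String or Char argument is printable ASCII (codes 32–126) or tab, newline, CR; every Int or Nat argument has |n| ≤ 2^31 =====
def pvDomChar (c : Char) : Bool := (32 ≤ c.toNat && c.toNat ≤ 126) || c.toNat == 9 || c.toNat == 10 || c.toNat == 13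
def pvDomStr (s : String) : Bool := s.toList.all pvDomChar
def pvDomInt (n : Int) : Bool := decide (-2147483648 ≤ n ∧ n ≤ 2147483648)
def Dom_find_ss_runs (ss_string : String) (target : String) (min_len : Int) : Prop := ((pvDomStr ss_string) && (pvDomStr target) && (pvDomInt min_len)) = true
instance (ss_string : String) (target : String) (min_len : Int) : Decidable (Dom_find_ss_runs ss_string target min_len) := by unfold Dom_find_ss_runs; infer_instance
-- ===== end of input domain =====

-- B replaces A's stateful outer/inner while-loop scan by a staged boundary-detection
-- pipeline: boolean mask, neighbour-comparison passes for run starts and run ends,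
-- zip into intervals, length filter (objective: alternative; same linear cost).

-- ===== PORT A =====
-- Python's `ss_string[j] == target` compares the 1-char string at position j with `target`;
-- on the PySem `List Char` side this is `[c] = target.toList` (exact for every target,
-- including empty and multi-char ones, where it is never true).  The while loops are
-- structural recursion on a fuel counter that merely totalises them (fuel is never
-- exhausted: each outer pass advances the index by at least one).

-- inner loop: `j = i; while j < n and ss_string[j] == target: j += 1`
def pvInnerA (cs tgt : List Char) (n : Int) : Nat → Int → Int
  | 0, j => j
  | fuel + 1, j =>
    if j < n ∧ (PySem.List.pyGet? cs j).map (fun c => [c]) = some tgt then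
      pvInnerA cs tgt n fuel (j + 1)
    else j

-- outer loop: `while i < n: …` (`j` is the value the inner loop leaves)
def pvOuterA (cs tgt : List Char) (m n : Int) : Nat → Int → List (Int × Int)
  | 0, _ => []
  | fuel + 1, i =>
    if i < n then
      if (PySem.List.pyGet? cs i).map (fun c => [c]) = some tgt then
        (if m ≤ pvInnerA cs tgt n ((n - i).toNat + 1) i - i then
          [(i, pvInnerA cs tgt n ((n - i).toNat + 1) i)] else []) ++
          pvOuterA cs tgt m n fuel (pvInnerA cs tgt n ((n - i).toNat + 1) i)
      else
        pvOuterA cs tgt m n fuel (i + 1)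
    else []

def find_ss_runs (ss_string : String) (target : String) (min_len : Int) : List (Int × Int) :=
  pvOuterA ss_string.toList target.toList min_len (ss_string.toList.length : Int)
    (ss_string.toList.length + 1) 0

-- ===== PORT B =====
-- `mask = [c == target for c in ss_string]` (char-vs-string comparison, as in port A)
def pvMaskB (cs tgt : List Char) : List Bool := cs.map (fun c => [c] == tgt)

-- the three comprehensions of Source B: starts, ends (enumerate start 1), and the final filter
def find_ss_runs_alt (ss_string : String) (target : String) (min_len : Int) : List (Int × Int) :=
  let mask := pvMaskB ss_string.toList target.toList
  let starts := ((PySem.List.enumerate ((false :: mask).zip mask) 0).filter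
      (fun x => x.2.2 && !x.2.1)).map (fun x => x.1)
  let ends := ((PySem.List.enumerate (mask.zip (PySem.List.slice mask (some 1) none ++ [false])) 1).filter
      (fun x => x.2.1 && !x.2.2)).map (fun x => x.1)
  (starts.zip ends).filter (fun x => min_len ≤ x.2 - x.1)

-- ===== PRECONDITION & SPEC =====
def Spec_find_ss_runs (ss_string : String) (target : String) (min_len : Int) (out : List (Int × Int)) : Prop := out = find_ss_runs_alt ss_string target min_len
instance (ss_string : String) (target : String) (min_len : Int) (out : List (Int × Int)) : Decidable (Spec_find_ss_runs ss_string target min_len out) := by unfold Spec_find_ss_runs; infer_instance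

-- ===== CLAIM (what is proved, stated in full; the proofs are below) =====
def Claim_equal_find_ss_runs : Prop := ∀ (ss_string : String) (target : String) (min_len : Int), Dom_find_ss_runs ss_string target min_len → Spec_find_ss_runs ss_string target min_len (find_ss_runs ss_string target min_len)

-- ===== LEMMAS AND PROOFS =====

-- the per-character test both programs make, as a Bool predicate
def pvP (tgt : List Char) (c : Char) : Bool := [c] == tgt

-- reference recursion A's port is reduced to
def pvRef (tgt : List Char) (m : Int) (cs : List Char) (b : Int) : List (Int × Int) :=
  match cs with
  | [] => []
  | c :: rest =>
    if pvP tgt c then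
      (if m ≤ ((((c :: rest).takeWhile (pvP tgt)).length : Nat) : Int) then
        [(b, b + ((((c :: rest).takeWhile (pvP tgt)).length : Nat) : Int))] else []) ++
        pvRef tgt m ((c :: rest).dropWhile (pvP tgt))
          (b + ((((c :: rest).takeWhile (pvP tgt)).length : Nat) : Int))
    else
      pvRef tgt m rest (b + 1)
termination_by cs.length
decreasing_by
  all_goals
    (have := (List.dropWhile_sublist (pvP tgt) (l := rest)).length_le
     simp_all [List.dropWhile])

-- the maximal true-runs of a Bool mask, as (start, end) pairs
def pvRuns (bs : List Bool) (i : Int) : List (Int × Int) :=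
  match bs with
  | [] => []
  | b :: rest =>
    if b then
      (i, i + ((((b :: rest).takeWhile (fun x => x)).length : Nat) : Int)) ::
        pvRuns ((b :: rest).dropWhile (fun x => x))
          (i + ((((b :: rest).takeWhile (fun x => x)).length : Nat) : Int))
    else
      pvRuns rest (i + 1)
termination_by bs.length
decreasing_by
  all_goals
    (have := (List.dropWhile_sublist (fun x : Bool => x) (l := rest)).length_le
     simp_all [List.dropWhile])

-- the boundary scans of B, as structural recursions
def pvStarts (prev : Bool) (bs : List Bool) (i : Int) : List Int :=
  match bs with
  | [] => []
  | b :: rest => (if b && !prev then [i] else []) ++ pvStarts b rest (i + 1)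

def pvEnds (bs : List Bool) (i : Int) : List Int :=
  match bs with
  | [] => []
  | b :: rest => (if b && !(rest.headD false) then [i + 1] else []) ++ pvEnds rest (i + 1)

theorem pv_dropWhile_eq_drop (p : Char → Bool) (l : List Char) :
    l.dropWhile p = l.drop (l.takeWhile p).length := by
  have h := List.takeWhile_append_dropWhile (p := p) (l := l)
  calc l.dropWhile p
      = (l.takeWhile p ++ l.dropWhile p).drop (l.takeWhile p).length :=
        List.drop_left.symm
    _ = l.drop (l.takeWhile p).length := by rw [h]

theorem pvInnerA_spec (cs tgt : List Char) (fuel : Nat) (j : Int) (hj : 0 ≤ j)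
    (hf : ((cs.length : Int) - j).toNat < fuel) :
    pvInnerA cs tgt (cs.length : Int) fuel j
      = j + (((cs.drop j.toNat).takeWhile (pvP tgt)).length : Int) := by
  induction fuel generalizing j with
  | zero => omega
  | succ fuel ih =>
    rw [pvInnerA]
    by_cases h : j < (cs.length : Int) ∧ (PySem.List.pyGet? cs j).map (fun c => [c]) = some tgt
    · rw [if_pos h]
      obtain ⟨hlt, hget⟩ := h
      have hjn : j.toNat < cs.length := by omega
      rw [PySem.List.pyGet?_of_nonneg cs hj, List.getElem?_eq_getElem hjn] at hget
      simp only [Option.map_some, Option.some.injEq] at hget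
      have hdrop : cs.drop j.toNat = cs[j.toNat] :: cs.drop (j.toNat + 1) :=
        List.drop_eq_getElem_cons hjn
      have hp : pvP tgt cs[j.toNat] = true := by simp [pvP, ← hget]
      rw [ih (j + 1) (by omega) (by omega)]
      have htn : (j + 1).toNat = j.toNat + 1 := by omega
      rw [htn, hdrop, List.takeWhile_cons, if_pos hp]
      simp only [List.length_cons]
      omega
    · rw [if_neg h]
      rcases Decidable.not_and_iff_not_or_not.mp h with hge | hne
      · have hle : cs.length ≤ j.toNat := by omega
        rw [List.drop_of_length_le hle]
        simp
      · by_cases hlt : j < (cs.length : Int)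
        · have hjn : j.toNat < cs.length := by omega
          have hdrop : cs.drop j.toNat = cs[j.toNat] :: cs.drop (j.toNat + 1) :=
            List.drop_eq_getElem_cons hjn
          have hp : pvP tgt cs[j.toNat] = false := by
            rw [PySem.List.pyGet?_of_nonneg cs hj, List.getElem?_eq_getElem hjn] at hne
            simp only [Option.map_some] at hne
            simp only [pvP, beq_eq_false_iff_ne, ne_eq]
            intro hc; exact hne (by rw [hc])
          rw [hdrop, List.takeWhile_cons, if_neg (by simp [hp])]
          simp
        · have hle : cs.length ≤ j.toNat := by omega
          rw [List.drop_of_length_le hle]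
          simp

theorem pvOuterA_spec (cs tgt : List Char) (m : Int) (fuel : Nat) (i : Int) (hi : 0 ≤ i)
    (hf : ((cs.length : Int) - i).toNat < fuel) :
    pvOuterA cs tgt m (cs.length : Int) fuel i = pvRef tgt m (cs.drop i.toNat) i := by
  induction fuel generalizing i with
  | zero => omega
  | succ fuel ih =>
    rw [pvOuterA]
    by_cases hlt : i < (cs.length : Int)
    · have hin : i.toNat < cs.length := by omega
      have hdrop : cs.drop i.toNat = cs[i.toNat] :: cs.drop (i.toNat + 1) :=
        List.drop_eq_getElem_cons hin
      by_cases ht : (PySem.List.pyGet? cs i).map (fun c => [c]) = some tgt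
      · rw [if_pos hlt, if_pos ht]
        have hget : [cs[i.toNat]] = tgt := by
          rw [PySem.List.pyGet?_of_nonneg cs hi, List.getElem?_eq_getElem hin] at ht
          simpa using ht
        have hp : pvP tgt cs[i.toNat] = true := by simp [pvP, ← hget]
        have hjk := pvInnerA_spec cs tgt (((cs.length : Int) - i).toNat + 1) i hi (by omega)
        have hkpos : 0 < ((cs.drop i.toNat).takeWhile (pvP tgt)).length := by
          rw [hdrop, List.takeWhile_cons, if_pos hp]
          simp
        have hkle : ((cs.drop i.toNat).takeWhile (pvP tgt)).length ≤ cs.length - i.toNat := by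
          have h1 := (List.takeWhile_sublist (l := cs.drop i.toNat) (p := pvP tgt)).length_le
          simpa using h1
        rw [hjk]
        rw [ih (i + (((cs.drop i.toNat).takeWhile (pvP tgt)).length : Int)) (by omega) (by omega)]
        have hR : pvRef tgt m (cs.drop i.toNat) i
            = (if m ≤ ((((cs.drop i.toNat).takeWhile (pvP tgt)).length : Nat) : Int) then
                [(i, i + ((((cs.drop i.toNat).takeWhile (pvP tgt)).length : Nat) : Int))] else []) ++
              pvRef tgt m ((cs.drop i.toNat).dropWhile (pvP tgt))
                (i + ((((cs.drop i.toNat).takeWhile (pvP tgt)).length : Nat) : Int)) := by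
          rw [hdrop, pvRef, if_pos hp, ← hdrop]
        rw [hR]
        have h2 : (cs.drop i.toNat).dropWhile (pvP tgt)
            = cs.drop (i + (((cs.drop i.toNat).takeWhile (pvP tgt)).length : Int)).toNat := by
          rw [pv_dropWhile_eq_drop, List.drop_drop]
          congr 1
          omega
        rw [h2]
        have h3 : i + (((cs.drop i.toNat).takeWhile (pvP tgt)).length : Int) - i
            = (((cs.drop i.toNat).takeWhile (pvP tgt)).length : Int) := by omega
        rw [h3]
      · rw [if_pos hlt, if_neg ht]
        have hp : pvP tgt cs[i.toNat] = false := by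
          rw [PySem.List.pyGet?_of_nonneg cs hi, List.getElem?_eq_getElem hin] at ht
          simp only [Option.map_some] at ht
          simp only [pvP, beq_eq_false_iff_ne, ne_eq]
          intro hc; exact ht (by rw [hc])
        rw [ih (i + 1) (by omega) (by omega)]
        have hR : pvRef tgt m (cs.drop i.toNat) i
            = pvRef tgt m (cs.drop (i.toNat + 1)) (i + 1) := by
          rw [hdrop, pvRef, if_neg (by simp [hp])]
        rw [hR]
        congr 2
        omega
    · rw [if_neg hlt]
      have hle : cs.length ≤ i.toNat := by omega
      rw [List.drop_of_length_le hle]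
      rw [pvRef]

-- A's reference equals the filtered true-runs of the mask
theorem pvRef_eq_filter_runs (tgt : List Char) (m : Int) (cs : List Char) (b : Int) :
    pvRef tgt m cs b
      = (pvRuns (cs.map (pvP tgt)) b).filter (fun x => m ≤ x.2 - x.1) := by
  induction hn : cs.length using Nat.strong_induction_on generalizing cs b with
  | _ n ih =>
    cases cs with
    | nil => rw [pvRef]; simp [pvRuns]
    | cons c rest =>
      rw [pvRef]
      have hmap : (c :: rest).map (pvP tgt) = pvP tgt c :: rest.map (pvP tgt) := rfl
      have htw : ((c :: rest).map (pvP tgt)).takeWhile (fun x => x)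
          = ((c :: rest).takeWhile (pvP tgt)).map (pvP tgt) := by
        rw [List.takeWhile_map]
        rfl
      have hdw : ((c :: rest).map (pvP tgt)).dropWhile (fun x => x)
          = ((c :: rest).dropWhile (pvP tgt)).map (pvP tgt) := by
        rw [List.dropWhile_map]
        rfl
      by_cases hp : pvP tgt c
      · rw [if_pos hp]
        rw [hmap, pvRuns, if_pos hp, ← hmap, htw, hdw, List.length_map]
        have hlt : ((c :: rest).dropWhile (pvP tgt)).length < n := by
          have h1 := (List.dropWhile_sublist (pvP tgt) (l := rest)).length_le
          rw [List.dropWhile_cons, if_pos hp]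
          simp only [List.length_cons] at hn
          omega
        rw [ih _ hlt _ _ rfl]
        have hsub : (b + (((c :: rest).takeWhile (pvP tgt)).length : Int)) - b
            = (((c :: rest).takeWhile (pvP tgt)).length : Int) := by omega
        by_cases hm : m ≤ ((((c :: rest).takeWhile (pvP tgt)).length : Nat) : Int)
        · rw [if_pos hm, List.filter_cons]
          rw [if_pos (by simp only [hsub]; exact decide_eq_true hm)]
          simp
        · rw [if_neg hm, List.filter_cons]
          rw [if_neg (by simp only [hsub]; simpa using hm)]
          simp
      · rw [if_neg hp]
        rw [hmap, pvRuns, if_neg (by simpa using hp)]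
        have hlt : rest.length < n := by simp only [List.length_cons] at hn; omega
        rw [ih _ hlt _ _ rfl]

-- bs.zip (bs[1:] ++ [false]) pairs each element with its successor (sentinel false)
theorem pv_zipNext_cons (b : Bool) (rest : List Bool) :
    (b :: rest).zip (rest ++ [false])
      = (b, rest.headD false) :: rest.zip (rest.tail ++ [false]) := by
  cases rest with
  | nil => simp
  | cons c r2 => simp [List.zip_cons_cons]

-- the starts comprehension is the pvStarts recursion
theorem pvStarts_of_enum (bs : List Bool) (prev : Bool) (i : Int) :
    ((PySem.List.enumerate ((prev :: bs).zip bs) i).filter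
        (fun x => x.2.2 && !x.2.1)).map (fun x => x.1)
      = pvStarts prev bs i := by
  induction bs generalizing prev i with
  | nil => simp [pvStarts, PySem.List.enumerate_nil]
  | cons b rest ih =>
    rw [List.zip_cons_cons, PySem.List.enumerate_cons, List.filter_cons]
    rw [pvStarts]
    by_cases h : b && !prev
    · rw [if_pos (by simpa using h), if_pos h]
      simp only [List.map_cons]
      rw [ih b (i + 1)]
      rfl
    · rw [if_neg (by simpa using h), if_neg h]
      rw [ih b (i + 1)]
      rfl

-- the ends comprehension is the pvEnds recursion
theorem pvEnds_of_enum (bs : List Bool) (i : Int) :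
    ((PySem.List.enumerate (bs.zip (bs.tail ++ [false])) (i + 1)).filter
        (fun x => x.2.1 && !x.2.2)).map (fun x => x.1)
      = pvEnds bs i := by
  induction bs generalizing i with
  | nil => simp [pvEnds, PySem.List.enumerate_nil]
  | cons b rest ih =>
    rw [List.tail_cons, pv_zipNext_cons, PySem.List.enumerate_cons, List.filter_cons]
    rw [pvEnds]
    by_cases h : b && !(rest.headD false)
    · rw [if_pos (by simpa using h), if_pos h]
      simp only [List.map_cons]
      rw [ih (i + 1)]
      rfl
    · rw [if_neg (by simpa using h), if_neg h]
      rw [ih (i + 1)]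
      rfl

theorem pv_mem_takeWhile_bool {l : List Bool} {a : Bool}
    (h : a ∈ l.takeWhile (fun x => x)) : a = true := by
  induction l with
  | nil => simp at h
  | cons x xs ih =>
    rw [List.takeWhile_cons] at h
    by_cases hx : x = true
    · simp [hx] at h
      rcases h with rfl | h
      · rfl
      · exact ih h
    · simp [hx] at h

theorem pv_head_dropWhile_bool (l : List Bool) :
    (l.dropWhile (fun x => x)).headD false = false := by
  induction l with
  | nil => simp
  | cons x xs ih =>
    rw [List.dropWhile_cons]
    by_cases hx : x = true
    · simpa [hx] using ih
    · simp at hx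
      simp [hx]

-- pvStarts with prev = true skips an all-true block
theorem pvStarts_all_true (t : List Bool) (ht : ∀ x ∈ t, x = true) (rest : List Bool) (i : Int) :
    pvStarts true (t ++ rest) i = pvStarts true rest (i + (t.length : Int)) := by
  induction t generalizing i with
  | nil => simp
  | cons a tl ih =>
    have ha : a = true := ht a List.mem_cons_self
    rw [List.cons_append, pvStarts, ha]
    rw [if_neg (by decide), List.nil_append,
      ih (fun x hx => ht x (List.mem_cons_of_mem a hx)) (i + 1)]
    congr 1
    simp only [List.length_cons]
    push_cast
    omega

-- once the head is false (or the list empty), the prev flag is irrelevant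
theorem pvStarts_true_eq_false (bs : List Bool) (i : Int)
    (h : bs.headD false = false) : pvStarts true bs i = pvStarts false bs i := by
  cases bs with
  | nil => rfl
  | cons b rest =>
    simp only [List.headD_cons] at h
    rw [pvStarts, pvStarts, h]
    simp

-- starts scan = first components of the runs
theorem pvStarts_eq_map_fst (bs : List Bool) (i : Int) :
    pvStarts false bs i = (pvRuns bs i).map Prod.fst := by
  induction hn : bs.length using Nat.strong_induction_on generalizing bs i with
  | _ n ih =>
    cases bs with
    | nil => rw [pvStarts]; simp [pvRuns]
    | cons b rest =>
      by_cases hb : b = true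
      · subst hb
        have hsplit : rest.takeWhile (fun x => x) ++ rest.dropWhile (fun x => x) = rest :=
          List.takeWhile_append_dropWhile
        have htw : (true :: rest).takeWhile (fun x => x)
            = true :: rest.takeWhile (fun x => x) := by
          rw [List.takeWhile_cons]; simp
        have hdw : (true :: rest).dropWhile (fun x => x) = rest.dropWhile (fun x => x) := by
          rw [List.dropWhile_cons]; simp
        have hlt : (rest.dropWhile (fun x => x)).length < n := by
          have h1 := (List.dropWhile_sublist (fun x : Bool => x) (l := rest)).length_le
          simp only [List.length_cons] at hn
          omega
        have hL : pvStarts true rest (i + 1)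
            = pvStarts false (rest.dropWhile (fun x => x))
                (i + 1 + ((rest.takeWhile (fun x => x)).length : Int)) := by
          conv_lhs => rw [← hsplit]
          rw [pvStarts_all_true _ (fun x hx => pv_mem_takeWhile_bool hx) _ (i + 1)]
          rw [pvStarts_true_eq_false _ _ (pv_head_dropWhile_bool rest)]
        have hlen : i + 1 + ((rest.takeWhile (fun x => x)).length : Int)
            = i + (((true :: rest.takeWhile (fun x => x)).length : Nat) : Int) := by
          simp only [List.length_cons]; push_cast; ring
        rw [pvRuns, if_pos rfl, pvStarts, if_pos (by decide), List.singleton_append, hL,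
          ih _ hlt _ _ rfl, List.map_cons, hdw, htw, hlen]
      · simp only [Bool.not_eq_true] at hb
        subst hb
        rw [pvRuns, if_neg (by simp), pvStarts, if_neg (by decide), List.nil_append]
        have hlt : rest.length < n := by simp only [List.length_cons] at hn; omega
        exact ih _ hlt _ _ rfl

-- pvEnds over a nonempty all-true block followed by a false-headed (or empty) tail
theorem pvEnds_all_true (t : List Bool) (ht : ∀ x ∈ t, x = true) (htne : t ≠ [])
    (d : List Bool) (hd : d.headD false = false) (j : Int) :
    pvEnds (t ++ d) j = (j + (t.length : Int)) :: pvEnds d (j + (t.length : Int)) := by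
  induction t generalizing j with
  | nil => exact absurd rfl htne
  | cons a tl ih =>
    have ha : a = true := ht a List.mem_cons_self
    subst ha
    cases tl with
    | nil =>
      rw [List.cons_append, pvEnds]
      have hh : (([] : List Bool) ++ d).headD false = false := by simpa using hd
      rw [List.nil_append] at hh ⊢
      simp only [hh, Bool.not_false, Bool.and_true, List.length_cons, List.length_nil]
      norm_num
    | cons c tl2 =>
      have hc : c = true := ht c (List.mem_cons_of_mem _ List.mem_cons_self)
      subst hc
      rw [List.cons_append, pvEnds]
      rw [if_neg (by simp), List.nil_append]
      rw [ih (fun x hx => ht x (List.mem_cons_of_mem _ hx)) (by simp) (j + 1)]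
      have hlen : j + 1 + ((true :: tl2).length : Int)
          = j + (((true :: true :: tl2).length : Nat) : Int) := by
        simp only [List.length_cons]
        push_cast
        ring
      rw [hlen]

-- ends scan = second components of the runs
theorem pvEnds_eq_map_snd (bs : List Bool) (i : Int) :
    pvEnds bs i = (pvRuns bs i).map Prod.snd := by
  induction hn : bs.length using Nat.strong_induction_on generalizing bs i with
  | _ n ih =>
    cases bs with
    | nil => rw [pvEnds]; simp [pvRuns]
    | cons b rest =>
      by_cases hb : b = true
      · subst hb
        rw [pvRuns, if_pos rfl]
        have htw : (true :: rest).takeWhile (fun x => x)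
            = true :: rest.takeWhile (fun x => x) := by
          rw [List.takeWhile_cons]; simp
        have hdw : (true :: rest).dropWhile (fun x => x) = rest.dropWhile (fun x => x) := by
          rw [List.dropWhile_cons]; simp
        have hsplit : rest.takeWhile (fun x => x) ++ rest.dropWhile (fun x => x) = rest :=
          List.takeWhile_append_dropWhile
        have hE : pvEnds (true :: rest) i
            = pvEnds ((true :: rest.takeWhile (fun x => x)) ++ rest.dropWhile (fun x => x)) i := by
          rw [List.cons_append, hsplit]
        rw [hE, pvEnds_all_true _ (by
            intro x hx
            rcases List.mem_cons.mp hx with rfl | hx'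
            · rfl
            · exact pv_mem_takeWhile_bool hx') (by simp) _ (pv_head_dropWhile_bool rest) i]
        have hlt : (rest.dropWhile (fun x => x)).length < n := by
          have h1 := (List.dropWhile_sublist (fun x : Bool => x) (l := rest)).length_le
          simp only [List.length_cons] at hn
          omega
        rw [ih _ hlt _ _ rfl]
        simp only [List.map_cons, htw, hdw]
      · simp only [Bool.not_eq_true] at hb
        subst hb
        rw [pvRuns, if_neg (by simp), pvEnds, if_neg (by simp), List.nil_append]
        have hlt : rest.length < n := by simp only [List.length_cons] at hn; omega
        exact ih _ hlt _ _ rfl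

-- ===== VERDICT (by name: the statement is the Claim_ definition above) =====
theorem find_ss_runs_spec : Claim_equal_find_ss_runs := by
  intro s t m _
  unfold Spec_find_ss_runs find_ss_runs find_ss_runs_alt
  rw [pvOuterA_spec s.toList t.toList m (s.toList.length + 1) 0 (by omega) (by omega)]
  simp only [List.drop_zero, Int.toNat_zero]
  rw [pvRef_eq_filter_runs]
  have hmask : pvMaskB s.toList t.toList = s.toList.map (pvP t.toList) := rfl
  rw [hmask]
  rw [PySem.List.slice_from_one]
  rw [pvStarts_of_enum (s.toList.map (pvP t.toList)) false 0]
  have hE := pvEnds_of_enum (s.toList.map (pvP t.toList)) 0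
  norm_num at hE
  rw [hE]
  rw [pvStarts_eq_map_fst, pvEnds_eq_map_snd]
  rw [List.zip_map']
  simp
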